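-- pv_equiv track=rewrite | github.com/anwu/advent_of_code_2020 | day_11/seating_system.py | p1_activate_seat_rule
-- ===== SOURCE A (Python) =====
-- import copy
--
-- def get_adjacents(seat_map, row, col):
--     """Get the adjacent seats around the current seat"""
--     adjacents = []
--
--     if row - 1 >= 0:
--         adjacents.append(seat_map[row-1][col]) # add top
--         if col - 1 >= 0:
--             adjacents.append(seat_map[row-1][col-1]) # add top left
--         if col + 1 < len(seat_map[row]):
--             adjacents.append(seat_map[row-1][col+1]) # add top right
--     if row + 1 < len(seat_map):
--         adjacents.append(seat_map[row+1][col]) # add bot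
--         if col - 1 >= 0:
--             adjacents.append(seat_map[row+1][col-1]) # add bot left
--         if col + 1 < len(seat_map[row]):
--             adjacents.append(seat_map[row+1][col+1]) # add bot right
--     if col - 1 >= 0:
--         adjacents.append(seat_map[row][col-1]) # add left
--     if col + 1 < len(seat_map[row]):
--         adjacents.append(seat_map[row][col+1]) # add right
--
--     return adjacents
--
-- def p1_activate_seat_rule(seat_map):
--     """Applies an iteration of the rules for part 1"""
--     seat_map_copy = copy.deepcopy(seat_map)
--     seat_change = False
--
--     for row in range(len(seat_map)):
--         for col in range(len(seat_map[row])):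
--             adjacents = get_adjacents(seat_map_copy, row, col)
--             if seat_map_copy[row][col] == 'L' and adjacents.count('#') == 0:
--                 seat_map[row][col] = '#'
--                 seat_change = True
--             elif seat_map_copy[row][col] == '#' and adjacents.count('#') >= 4:
--                 seat_map[row][col] = 'L'
--                 seat_change = True
--
--     return seat_change
-- ===== SOURCE B (Python) =====
-- def p1_activate_seat_rule(seat_map):
--     """One round of the part-1 rules via staged passes: build a 0/1 occupancy
--     grid, collapse three vertical rows into one column-sum row, then a sliding
--     3-wide horizontal window (minus the cell itself) gives each neighbour count;
--     no per-cell neighbourhood enumeration at all."""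
--     ind = [[1 if cell == '#' else 0 for cell in row] for row in seat_map]
--     states = [list(row) for row in seat_map]
--     zero = [0] * (len(seat_map[0]) if seat_map else 0)
--     changed = False
--     for r in range(len(seat_map)):
--         above = ind[r-1] if r > 0 else zero
--         below = ind[r+1] if r + 1 < len(ind) else zero
--         vert = [x + y + z for x, y, z in zip(above, ind[r], below)]
--         for c in range(len(states[r])):
--             cnt = ((vert[c-1] if c > 0 else 0) + vert[c]
--                    + (vert[c+1] if c + 1 < len(vert) else 0) - ind[r][c])
--             if states[r][c] == 'L' and cnt == 0:
--                 seat_map[r][c] = '#'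
--                 changed = True
--             elif states[r][c] == '#' and cnt >= 4:
--                 seat_map[r][c] = 'L'
--                 changed = True
--     return changed
-- ===== Notes on version B (the rewrite author's own statement) =====
-- stated objective: alternative
-- what changed: B replaces A's per-cell hand-built adjacency list with staged passes over new data structures: a 0/1 occupancy grid, a per-row collapse of three vertical rows into one column-sum row, and a sliding 3-wide horizontal window minus the cell itself, so no per-cell neighbourhood enumeration remains.
import Mathlib
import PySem

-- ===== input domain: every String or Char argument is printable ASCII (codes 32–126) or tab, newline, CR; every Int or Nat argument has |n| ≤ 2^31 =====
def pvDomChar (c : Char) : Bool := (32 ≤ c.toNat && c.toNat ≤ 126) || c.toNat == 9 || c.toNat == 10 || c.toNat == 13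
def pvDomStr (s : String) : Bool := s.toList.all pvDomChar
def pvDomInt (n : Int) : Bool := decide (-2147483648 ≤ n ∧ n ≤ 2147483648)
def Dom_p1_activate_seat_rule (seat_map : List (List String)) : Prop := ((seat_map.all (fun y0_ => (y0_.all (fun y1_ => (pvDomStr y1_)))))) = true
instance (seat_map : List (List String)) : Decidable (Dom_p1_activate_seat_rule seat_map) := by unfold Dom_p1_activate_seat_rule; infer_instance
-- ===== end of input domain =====

-- B computes neighbour counts by staged passes (occupancy grid, 3-row vertical column sums,
-- sliding 3-wide horizontal window) instead of A's per-cell adjacency list; same cost.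
-- Both Pythons mutate seat_map in place in the same way on Pre_; the theorems below are about the return value.


-- ===== PORT A =====
-- shared low-level read m[r][c]; every use below is guarded, so on Pre_ the default "" never fires
def pvGet2 (m : List (List String)) (r c : Int) : String :=
  PySem.List.pyGetD (PySem.List.pyGetD m r []) c ""

def get_adjacents (seat_map : List (List String)) (row col : Int) : List String :=
  let adjacents : List String := []
  let adjacents :=
    if row - 1 ≥ 0 then
      let adjacents := adjacents ++ [pvGet2 seat_map (row - 1) col]
      let adjacents := if col - 1 ≥ 0 then adjacents ++ [pvGet2 seat_map (row - 1) (col - 1)] else adjacents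
      if col + 1 < ((PySem.List.pyGetD seat_map row []).length : Int) then adjacents ++ [pvGet2 seat_map (row - 1) (col + 1)] else adjacents
    else adjacents
  let adjacents :=
    if row + 1 < (seat_map.length : Int) then
      let adjacents := adjacents ++ [pvGet2 seat_map (row + 1) col]
      let adjacents := if col - 1 ≥ 0 then adjacents ++ [pvGet2 seat_map (row + 1) (col - 1)] else adjacents
      if col + 1 < ((PySem.List.pyGetD seat_map row []).length : Int) then adjacents ++ [pvGet2 seat_map (row + 1) (col + 1)] else adjacents
    else adjacents
  let adjacents := if col - 1 ≥ 0 then adjacents ++ [pvGet2 seat_map row (col - 1)] else adjacents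
  let adjacents := if col + 1 < ((PySem.List.pyGetD seat_map row []).length : Int) then adjacents ++ [pvGet2 seat_map row (col + 1)] else adjacents
  adjacents

-- seat_map[row][col] = v ; exact for the nonnegative in-range indices range() produces
def pySet2 (m : List (List String)) (r c : Int) (v : String) : List (List String) :=
  m.modify r.toNat (fun rw => rw.set c.toNat v)

def p1_activate_seat_rule (seat_map : List (List String)) : Bool :=
  let seat_map_copy := seat_map   -- copy.deepcopy: identity for Lean's immutable lists
  ((PySem.List.pyRange 0 (seat_map.length : Int)).foldl (fun (st : List (List String) × Bool) row =>
    (PySem.List.pyRange 0 ((PySem.List.pyGetD st.1 row []).length : Int)).foldl (fun st col =>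
      let adjacents := get_adjacents seat_map_copy row col
      if pvGet2 seat_map_copy row col = "L" ∧ adjacents.count "#" = 0 then
        (pySet2 st.1 row col "#", true)
      else if pvGet2 seat_map_copy row col = "#" ∧ 4 ≤ adjacents.count "#" then
        (pySet2 st.1 row col "L", true)
      else st) st) (seat_map, false)).2

-- ===== PORT B =====
def p1_activate_seat_rule_alt (seat_map : List (List String)) : Bool :=
  let ind := seat_map.map (fun row => row.map (fun cell => if cell = "#" then (1 : Int) else 0))
  let states := seat_map   -- states = [list(row) for row in seat_map]: row copies are identity for Lean's immutable lists
  let zero : List Int := List.replicate (if seat_map.length > 0 then (PySem.List.pyGetD seat_map 0 []).length else 0) 0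
  ((PySem.List.pyRange 0 (seat_map.length : Int)).foldl (fun (st : List (List String) × Bool) r =>
    let above := if r > 0 then PySem.List.pyGetD ind (r - 1) [] else zero
    let below := if r + 1 < (ind.length : Int) then PySem.List.pyGetD ind (r + 1) [] else zero
    let vert := (above.zip ((PySem.List.pyGetD ind r []).zip below)).map (fun t => t.1 + t.2.1 + t.2.2)
    (PySem.List.pyRange 0 ((PySem.List.pyGetD states r []).length : Int)).foldl (fun st c =>
      let cnt := (if c > 0 then PySem.List.pyGetD vert (c - 1) 0 else 0) + PySem.List.pyGetD vert c 0
                 + (if c + 1 < (vert.length : Int) then PySem.List.pyGetD vert (c + 1) 0 else 0)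
                 - PySem.List.pyGetD (PySem.List.pyGetD ind r []) c 0
      if pvGet2 states r c = "L" ∧ cnt = 0 then (pySet2 st.1 r c "#", true)
      else if pvGet2 states r c = "#" ∧ 4 ≤ cnt then (pySet2 st.1 r c "L", true)
      else st) st) (seat_map, false)).2

-- ===== PRECONDITION & SPEC =====
-- Pre_ excludes exactly the jagged maps: there A's neighbour reads use the current row's
-- length as the column bound for OTHER rows and raise IndexError (B raises there too).
def Pre_p1_activate_seat_rule (seat_map : List (List String)) : Prop :=
  List.IsChain (fun a b => a.length = b.length) seat_map

instance (seat_map : List (List String)) : Decidable (Pre_p1_activate_seat_rule seat_map) := by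
  unfold Pre_p1_activate_seat_rule; infer_instance

def pvWitness_p1_activate_seat_rule : List (List String) := [["L", "#"], [".", "L"]]

def Spec_p1_activate_seat_rule (seat_map : List (List String)) (out : Bool) : Prop :=
  out = p1_activate_seat_rule_alt seat_map
instance (seat_map : List (List String)) (out : Bool) : Decidable (Spec_p1_activate_seat_rule seat_map out) := by
  unfold Spec_p1_activate_seat_rule; infer_instance

-- ===== CLAIM (what is proved, stated in full; the proofs are below) =====
def Claim_equal_p1_activate_seat_rule : Prop := ∀ (seat_map : List (List String)), Dom_p1_activate_seat_rule seat_map → Pre_p1_activate_seat_rule seat_map → Spec_p1_activate_seat_rule seat_map (p1_activate_seat_rule seat_map)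

-- ===== LEMMAS AND PROOFS =====

-- All rows of a map satisfying Pre_ have the same length.
lemma pv_lens {s : List (List String)} (h : Pre_p1_activate_seat_rule s) :
    ∀ (i j : Nat) (hi : i < s.length) (hj : j < s.length), (s[i]'hi).length = (s[j]'hj).length := by
  have step := List.isChain_iff_getElem.1 h
  have asc : ∀ (k i : Nat) (hk : i + k < s.length), (s[i]'(by omega)).length = (s[i+k]'hk).length := by
    intro k
    induction k with
    | zero => intro i hk; rfl
    | succ k ih =>
      intro i hk
      have h1 : i + 1 < s.length := by omega
      have e1 := step i h1
      have e2 := ih (i+1) (by omega)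
      have e3 : s[i+1+k]'(by omega) = s[i+(k+1)]'hk := getElem_congr_idx (by omega)
      rw [e3] at e2
      omega
  intro i j hi hj
  rcases Nat.le_total i j with hij | hij
  · have h5 := asc (j - i) i (by omega)
    have e : s[i + (j-i)]'(by omega) = s[j]'hj := getElem_congr_idx (by omega)
    rw [e] at h5; exact h5
  · have h5 := asc (i - j) j (by omega)
    have e : s[j + (i-j)]'(by omega) = s[i]'hi := getElem_congr_idx (by omega)
    rw [e] at h5; omega

-- pySet2 never changes the shape (row lengths) of the map.
lemma pySet2_lens (m : List (List String)) (r c : Int) (v : String) :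
    (pySet2 m r c v).map List.length = m.map List.length := by
  unfold pySet2
  apply List.ext_getElem
  · simp
  · intro k h1 h2
    simp only [List.getElem_map, List.getElem_modify]
    split
    · simp
    · rfl

-- Maps with the same shape have the same Python len(seat_map[r]) everywhere.
lemma RL_congr {m s : List (List String)} (hl : m.map List.length = s.map List.length) (r : Int) :
    (PySem.List.pyGetD m r []).length = (PySem.List.pyGetD s r []).length := by
  have h1 := PySem.List.pyGetD_map List.length m r []
  have h2 := PySem.List.pyGetD_map List.length s r []
  rw [← h1, ← h2, hl]

-- the per-cell decision of A's loop body, as a pure Boolean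
def chA (s : List (List String)) (row col : Int) : Bool :=
  decide (pvGet2 s row col = "L" ∧ (get_adjacents s row col).count "#" = 0)
  || decide (pvGet2 s row col = "#" ∧ 4 ≤ (get_adjacents s row col).count "#")

-- B's per-row staged pass: 3-row vertical column sums (proof-side mirror of the port's lets)
def pvVertList (s : List (List String)) (r : Int) : List Int :=
  let ind := s.map (fun row => row.map (fun cell => if cell = "#" then (1 : Int) else 0))
  let zero : List Int := List.replicate (if s.length > 0 then (PySem.List.pyGetD s 0 []).length else 0) 0
  let above := if r > 0 then PySem.List.pyGetD ind (r - 1) [] else zero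
  let below := if r + 1 < (ind.length : Int) then PySem.List.pyGetD ind (r + 1) [] else zero
  (above.zip ((PySem.List.pyGetD ind r []).zip below)).map (fun t => t.1 + t.2.1 + t.2.2)

-- B's per-cell neighbour count: sliding 3-wide window on the vertical sums, minus the cell
def pvCnt (s : List (List String)) (r c : Int) : Int :=
  (if c > 0 then PySem.List.pyGetD (pvVertList s r) (c - 1) 0 else 0)
  + PySem.List.pyGetD (pvVertList s r) c 0
  + (if c + 1 < ((pvVertList s r).length : Int) then PySem.List.pyGetD (pvVertList s r) (c + 1) 0 else 0)
  - PySem.List.pyGetD (PySem.List.pyGetD (s.map (fun row => row.map (fun cell => if cell = "#" then (1 : Int) else 0))) r []) c 0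

-- the per-cell decision of B's loop body, as a pure Boolean
def chB (s : List (List String)) (r c : Int) : Bool :=
  decide (pvGet2 s r c = "L" ∧ pvCnt s r c = 0)
  || decide (pvGet2 s r c = "#" ∧ 4 ≤ pvCnt s r c)

-- row-bounded occupancy indicator (column read is total via pvGet2's default)
def pvTI (s : List (List String)) (p x : Int) : Int :=
  if 0 ≤ p ∧ p < (s.length : Int) ∧ pvGet2 s p x = "#" then 1 else 0

lemma innerA (s : List (List String)) (row : Int) (cols : List Int) :
    ∀ (st : List (List String) × Bool),
    (cols.foldl (fun st col =>
      let adjacents := get_adjacents s row col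
      if pvGet2 s row col = "L" ∧ adjacents.count "#" = 0 then
        (pySet2 st.1 row col "#", true)
      else if pvGet2 s row col = "#" ∧ 4 ≤ adjacents.count "#" then
        (pySet2 st.1 row col "L", true)
      else st) st)
    = ((cols.foldl (fun m col =>
        if pvGet2 s row col = "L" ∧ (get_adjacents s row col).count "#" = 0 then pySet2 m row col "#"
        else if pvGet2 s row col = "#" ∧ 4 ≤ (get_adjacents s row col).count "#" then pySet2 m row col "L"
        else m) st.1), st.2 || cols.any (chA s row)) := by
  induction cols with
  | nil => intro st; simp
  | cons c cs ih =>
    intro st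
    simp only [List.foldl_cons, List.any_cons, ih]
    by_cases h1 : pvGet2 s row c = "L" ∧ (get_adjacents s row c).count "#" = 0
    · simp [chA, h1]
    · by_cases h2 : pvGet2 s row c = "#" ∧ 4 ≤ (get_adjacents s row c).count "#"
      · simp [chA, h2]
      · simp [chA, h1, h2]

lemma innerA_lens (s : List (List String)) (row : Int) (cols : List Int) :
    ∀ (m : List (List String)),
    (cols.foldl (fun m col =>
        if pvGet2 s row col = "L" ∧ (get_adjacents s row col).count "#" = 0 then pySet2 m row col "#"
        else if pvGet2 s row col = "#" ∧ 4 ≤ (get_adjacents s row col).count "#" then pySet2 m row col "L"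
        else m) m).map List.length = m.map List.length := by
  induction cols with
  | nil => intro m; rfl
  | cons c cs ih =>
    intro m
    simp only [List.foldl_cons]
    rw [ih]
    split
    · rw [pySet2_lens]
    · split
      · rw [pySet2_lens]
      · rfl

lemma outerA (s : List (List String)) (rows : List Int) :
    ∀ (st : List (List String) × Bool), st.1.map List.length = s.map List.length →
    (rows.foldl (fun (st : List (List String) × Bool) row =>
      (PySem.List.pyRange 0 ((PySem.List.pyGetD st.1 row []).length : Int)).foldl (fun st col =>
        let adjacents := get_adjacents s row col
        if pvGet2 s row col = "L" ∧ adjacents.count "#" = 0 then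
          (pySet2 st.1 row col "#", true)
        else if pvGet2 s row col = "#" ∧ 4 ≤ adjacents.count "#" then
          (pySet2 st.1 row col "L", true)
        else st) st) st).2
    = (st.2 || rows.any (fun row =>
        (PySem.List.pyRange 0 ((PySem.List.pyGetD s row []).length : Int)).any (chA s row))) := by
  induction rows with
  | nil => intro st _; simp
  | cons r rs ih =>
    intro st hst
    simp only [List.foldl_cons, List.any_cons]
    rw [innerA]
    rw [ih _ (by rw [innerA_lens]; exact hst)]
    rw [RL_congr hst r, Bool.or_assoc]

lemma A_eq_any (s : List (List String)) :
    p1_activate_seat_rule s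
    = (PySem.List.pyRange 0 (s.length : Int)).any (fun row =>
        (PySem.List.pyRange 0 ((PySem.List.pyGetD s row []).length : Int)).any (chA s row)) := by
  exact (outerA s (PySem.List.pyRange 0 (s.length : Int)) (s, false) rfl).trans (Bool.false_or _)

lemma innerB (s : List (List String)) (r : Int) (cols : List Int) :
    ∀ (st : List (List String) × Bool),
    (cols.foldl (fun st c =>
      if pvGet2 s r c = "L" ∧ pvCnt s r c = 0 then (pySet2 st.1 r c "#", true)
      else if pvGet2 s r c = "#" ∧ 4 ≤ pvCnt s r c then (pySet2 st.1 r c "L", true)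
      else st) st).2
    = (st.2 || cols.any (chB s r)) := by
  induction cols with
  | nil => intro st; simp
  | cons c cs ih =>
    intro st
    simp only [List.foldl_cons, List.any_cons]
    by_cases h1 : pvGet2 s r c = "L" ∧ pvCnt s r c = 0
    · rw [ih]; simp [chB, h1]
    · by_cases h2 : pvGet2 s r c = "#" ∧ 4 ≤ pvCnt s r c
      · rw [ih]; simp [chB, h2]
      · rw [ih]; simp [chB, h1, h2]

lemma outerB (s : List (List String)) (rows : List Int) :
    ∀ (st : List (List String) × Bool),
    (rows.foldl (fun (st : List (List String) × Bool) r =>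
      (PySem.List.pyRange 0 ((PySem.List.pyGetD s r []).length : Int)).foldl (fun st c =>
        if pvGet2 s r c = "L" ∧ pvCnt s r c = 0 then (pySet2 st.1 r c "#", true)
        else if pvGet2 s r c = "#" ∧ 4 ≤ pvCnt s r c then (pySet2 st.1 r c "L", true)
        else st) st) st).2
    = (st.2 || rows.any (fun r =>
        (PySem.List.pyRange 0 ((PySem.List.pyGetD s r []).length : Int)).any (chB s r))) := by
  induction rows with
  | nil => intro st; simp
  | cons r rs ih =>
    intro st
    simp only [List.foldl_cons, List.any_cons]
    rw [ih, innerB, Bool.or_assoc]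

lemma B_eq_any (s : List (List String)) :
    p1_activate_seat_rule_alt s
    = (PySem.List.pyRange 0 (s.length : Int)).any (fun r =>
        (PySem.List.pyRange 0 ((PySem.List.pyGetD s r []).length : Int)).any (chB s r)) := by
  exact (outerB s (PySem.List.pyRange 0 (s.length : Int)) (s, false)).trans (Bool.false_or _)

lemma zip3_pyGetD (xs ys zs : List Int) (x : Int) (hx0 : 0 ≤ x)
    (hxa : x < (xs.length : Int)) (hxb : x < (ys.length : Int)) (hxc : x < (zs.length : Int)) :
    PySem.List.pyGetD ((xs.zip (ys.zip zs)).map (fun t => t.1 + t.2.1 + t.2.2)) x 0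
    = PySem.List.pyGetD xs x 0 + PySem.List.pyGetD ys x 0 + PySem.List.pyGetD zs x 0 := by
  rw [PySem.List.pyGetD_eq_getElem _ 0 hx0 (by simp; omega),
      PySem.List.pyGetD_eq_getElem xs 0 hx0 hxa,
      PySem.List.pyGetD_eq_getElem ys 0 hx0 hxb,
      PySem.List.pyGetD_eq_getElem zs 0 hx0 hxc]
  simp

-- the heart: A's adjacency-list count of '#' equals B's windowed vertical-sum count
lemma cell_count (s : List (List String)) (h : Pre_p1_activate_seat_rule s) (row col : Int)
    (hr : 0 ≤ row) (hrn : row < (s.length : Int))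
    (hc : 0 ≤ col) (hcl : col < ((PySem.List.pyGetD s row []).length : Int)) :
    (((get_adjacents s row col).count "#" : Nat) : Int) = pvCnt s row col := by
  have hW : ∀ (r' : Int), 0 ≤ r' → r' < (s.length : Int) →
      ((PySem.List.pyGetD s r' []).length : Int) = ((PySem.List.pyGetD s row []).length : Int) := by
    intro r' h1 h2
    rw [PySem.List.pyGetD_eq_getElem s [] h1 h2, PySem.List.pyGetD_eq_getElem s [] hr hrn]
    exact_mod_cast congrArg (Nat.cast (R := Int))
      (pv_lens h r'.toNat row.toNat (by omega) (by omega))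
  have hindget : ∀ (r' : Int),
      PySem.List.pyGetD (s.map (fun row => row.map (fun cell => if cell = "#" then (1 : Int) else 0))) r' []
      = (PySem.List.pyGetD s r' []).map (fun cell => if cell = "#" then (1 : Int) else 0) :=
    fun r' => PySem.List.pyGetD_map (fun row => row.map (fun cell => if cell = "#" then (1 : Int) else 0)) s r' []
  have hcell : ∀ (r' x : Int), 0 ≤ r' → r' < (s.length : Int) → 0 ≤ x →
      x < ((PySem.List.pyGetD s row []).length : Int) →
      PySem.List.pyGetD ((PySem.List.pyGetD s r' []).map (fun cell => if cell = "#" then (1 : Int) else 0)) x 0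
      = if pvGet2 s r' x = "#" then (1 : Int) else 0 := by
    intro r' x h1 h2 hx0 hx
    rw [PySem.List.pyGetD_eq_getElem _ 0 hx0 (by rw [List.length_map, hW r' h1 h2]; exact hx)]
    unfold pvGet2
    rw [PySem.List.pyGetD_eq_getElem _ "" hx0 (by rw [hW r' h1 h2]; exact hx)]
    simp
  have hzero : ∀ (x : Int), 0 ≤ x → x < ((PySem.List.pyGetD s row []).length : Int) →
      PySem.List.pyGetD (List.replicate (if s.length > 0 then (PySem.List.pyGetD s 0 []).length else 0) (0 : Int)) x 0 = 0 := by
    intro x hx0 hx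
    have hz : (if s.length > 0 then (PySem.List.pyGetD s 0 []).length else 0) = (PySem.List.pyGetD s row []).length := by
      rw [if_pos (by omega)]
      have := hW 0 le_rfl (by omega); exact_mod_cast this
    rw [PySem.List.pyGetD_eq_getElem _ 0 hx0 (by rw [List.length_replicate, hz]; exact hx)]
    simp
  have hTIup : ∀ (x : Int), pvTI s (row - 1) x
      = if row - 1 ≥ 0 then (if pvGet2 s (row - 1) x = "#" then (1 : Int) else 0) else 0 := by
    intro x; unfold pvTI
    by_cases g : row - 1 ≥ 0
    · by_cases hg : pvGet2 s (row - 1) x = "#"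
      · rw [if_pos ⟨by omega, by omega, hg⟩, if_pos g, if_pos hg]
      · rw [if_neg (by tauto), if_pos g, if_neg hg]
    · rw [if_neg (by rintro ⟨a, -, -⟩; omega), if_neg g]
  have hTImid : ∀ (x : Int), pvTI s row x = if pvGet2 s row x = "#" then (1 : Int) else 0 := by
    intro x; unfold pvTI
    by_cases hg : pvGet2 s row x = "#"
    · rw [if_pos ⟨hr, hrn, hg⟩, if_pos hg]
    · rw [if_neg (by tauto), if_neg hg]
  have hTIdn : ∀ (x : Int), pvTI s (row + 1) x
      = if row + 1 < (s.length : Int) then (if pvGet2 s (row + 1) x = "#" then (1 : Int) else 0) else 0 := by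
    intro x; unfold pvTI
    by_cases g : row + 1 < (s.length : Int)
    · by_cases hg : pvGet2 s (row + 1) x = "#"
      · rw [if_pos ⟨by omega, g, hg⟩, if_pos g, if_pos hg]
      · rw [if_neg (by tauto), if_pos g, if_neg hg]
    · rw [if_neg (by rintro ⟨-, a, -⟩; omega), if_neg g]
  have hvert : ∀ (x : Int), 0 ≤ x → x < ((PySem.List.pyGetD s row []).length : Int) →
      PySem.List.pyGetD (pvVertList s row) x 0
      = pvTI s (row - 1) x + pvTI s row x + pvTI s (row + 1) x := by
    intro x hx0 hx
    rw [hTIup x, hTImid x, hTIdn x]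
    simp only [pvVertList, List.length_map]
    by_cases gup : row > 0
    · by_cases gdn : row + 1 < (s.length : Int)
      · rw [if_pos gup, if_pos gdn,
            zip3_pyGetD _ _ _ x hx0
              (by rw [hindget, List.length_map, hW (row - 1) (by omega) (by omega)]; exact hx)
              (by rw [hindget, List.length_map, hW row hr hrn]; exact hx)
              (by rw [hindget, List.length_map, hW (row + 1) (by omega) gdn]; exact hx),
            hindget (row - 1), hindget row, hindget (row + 1),
            hcell (row - 1) x (by omega) (by omega) hx0 hx,
            hcell row x hr hrn hx0 hx,
            hcell (row + 1) x (by omega) gdn hx0 hx,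
            if_pos (by omega : row - 1 ≥ 0), if_pos gdn]
      · rw [if_pos gup, if_neg gdn,
            zip3_pyGetD _ _ _ x hx0
              (by rw [hindget, List.length_map, hW (row - 1) (by omega) (by omega)]; exact hx)
              (by rw [hindget, List.length_map, hW row hr hrn]; exact hx)
              (by rw [List.length_replicate, if_pos (by omega)]
                  have := hW 0 le_rfl (by omega); omega),
            hindget (row - 1), hindget row,
            hcell (row - 1) x (by omega) (by omega) hx0 hx,
            hcell row x hr hrn hx0 hx,
            hzero x hx0 hx,
            if_pos (by omega : row - 1 ≥ 0), if_neg gdn]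
    · by_cases gdn : row + 1 < (s.length : Int)
      · rw [if_neg gup, if_pos gdn,
            zip3_pyGetD _ _ _ x hx0
              (by rw [List.length_replicate, if_pos (by omega)]
                  have := hW 0 le_rfl (by omega); omega)
              (by rw [hindget, List.length_map, hW row hr hrn]; exact hx)
              (by rw [hindget, List.length_map, hW (row + 1) (by omega) gdn]; exact hx),
            hindget row, hindget (row + 1),
            hzero x hx0 hx,
            hcell row x hr hrn hx0 hx,
            hcell (row + 1) x (by omega) gdn hx0 hx,
            if_neg (by omega : ¬ row - 1 ≥ 0), if_pos gdn]
      · rw [if_neg gup, if_neg gdn,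
            zip3_pyGetD _ _ _ x hx0
              (by rw [List.length_replicate, if_pos (by omega)]
                  have := hW 0 le_rfl (by omega); omega)
              (by rw [hindget, List.length_map, hW row hr hrn]; exact hx)
              (by rw [List.length_replicate, if_pos (by omega)]
                  have := hW 0 le_rfl (by omega); omega),
            hindget row,
            hzero x hx0 hx,
            hcell row x hr hrn hx0 hx,
            if_neg (by omega : ¬ row - 1 ≥ 0), if_neg gdn]
  have hvlen : ((pvVertList s row).length : Int) = ((PySem.List.pyGetD s row []).length : Int) := by
    have h0 := hW 0 le_rfl (by omega)
    simp only [pvVertList, List.length_map]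
    by_cases gup : row > 0
    · by_cases gdn : row + 1 < (s.length : Int)
      · rw [if_pos gup, if_pos gdn, hindget (row - 1), hindget row, hindget (row + 1)]
        simp only [List.length_map, List.length_zip]
        have a1 := hW (row - 1) (by omega) (by omega)
        have a2 := hW row hr hrn
        have a3 := hW (row + 1) (by omega) gdn
        omega
      · rw [if_pos gup, if_neg gdn, hindget (row - 1), hindget row]
        simp only [List.length_map, List.length_zip, List.length_replicate]
        rw [if_pos (show s.length > 0 by omega)]
        have a1 := hW (row - 1) (by omega) (by omega)
        have a2 := hW row hr hrn
        omega
    · by_cases gdn : row + 1 < (s.length : Int)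
      · rw [if_neg gup, if_pos gdn, hindget row, hindget (row + 1)]
        simp only [List.length_map, List.length_zip, List.length_replicate]
        rw [if_pos (show s.length > 0 by omega)]
        have a2 := hW row hr hrn
        have a3 := hW (row + 1) (by omega) gdn
        omega
      · rw [if_neg gup, if_neg gdn, hindget row]
        simp only [List.length_map, List.length_zip, List.length_replicate]
        rw [if_pos (show s.length > 0 by omega)]
        have a2 := hW row hr hrn
        omega
  have ecenter : PySem.List.pyGetD (PySem.List.pyGetD (s.map (fun row => row.map (fun cell => if cell = "#" then (1 : Int) else 0))) row []) col 0
      = pvTI s row col := by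
    rw [hindget row, hcell row col hr hrn hc hcl, hTImid col]
  have eL : (if col > 0 then PySem.List.pyGetD (pvVertList s row) (col - 1) 0 else 0)
      = if col - 1 ≥ 0 then pvTI s (row - 1) (col - 1) + pvTI s row (col - 1) + pvTI s (row + 1) (col - 1) else 0 := by
    by_cases g : col - 1 ≥ 0
    · rw [if_pos (by omega : col > 0), if_pos g, hvert (col - 1) (by omega) (by omega)]
    · rw [if_neg (by omega : ¬ col > 0), if_neg g]
  have eR : (if col + 1 < ((pvVertList s row).length : Int) then PySem.List.pyGetD (pvVertList s row) (col + 1) 0 else 0)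
      = if col + 1 < ((PySem.List.pyGetD s row []).length : Int) then pvTI s (row - 1) (col + 1) + pvTI s row (col + 1) + pvTI s (row + 1) (col + 1) else 0 := by
    rw [hvlen]
    by_cases g : col + 1 < ((PySem.List.pyGetD s row []).length : Int)
    · rw [if_pos g, if_pos g, hvert (col + 1) (by omega) g]
    · rw [if_neg g, if_neg g]
  unfold pvCnt
  rw [eL, hvert col hc hcl, eR, ecenter]
  simp only [hTIup, hTImid, hTIdn]
  by_cases g1 : 1 ≤ row <;> by_cases g4 : row + 1 < (s.length : Int) <;>
    by_cases g2 : 1 ≤ col <;> by_cases g3 : col + 1 < ((PySem.List.pyGetD s row []).length : Int) <;>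
    simp [get_adjacents, g1, g2, g3, g4, List.count_cons, List.count_nil, beq_iff_eq] <;> ring

-- A's and B's per-cell decisions agree on every in-bounds cell of a map satisfying Pre_.
lemma ch_bridge (s : List (List String)) (h : Pre_p1_activate_seat_rule s) (row col : Int)
    (hr : 0 ≤ row) (hrn : row < (s.length : Int))
    (hc : 0 ≤ col) (hcl : col < ((PySem.List.pyGetD s row []).length : Int)) :
    chA s row col = chB s row col := by
  have hcnt := cell_count s h row col hr hrn hc hcl
  unfold chA chB
  have h0 : ((get_adjacents s row col).count "#" = 0) ↔ (pvCnt s row col = 0) := by omega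
  have h4 : (4 ≤ (get_adjacents s row col).count "#") ↔ (4 ≤ pvCnt s row col) := by omega
  simp only [h0, h4]

-- ===== VERDICT (by name: the statement is the Claim_ definition above) =====
theorem p1_activate_seat_rule_spec : Claim_equal_p1_activate_seat_rule := by
  intro s _ hpre
  show p1_activate_seat_rule s = p1_activate_seat_rule_alt s
  rw [A_eq_any s, B_eq_any s]
  refine PySem.List.any_congr_mem ?_
  intro row hrow
  rw [PySem.List.mem_pyRange_one] at hrow
  refine PySem.List.any_congr_mem ?_
  intro col hcol
  rw [PySem.List.mem_pyRange_one] at hcol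
  exact ch_bridge s hpre row col hrow.1 hrow.2 hcol.1 hcol.2
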